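-- pv_equiv track=rewrite | github.com/pablolich/CMEECourseWork | Week2/Code/oaks_debugme.py | is_an_oak
-- ===== SOURCE A (Python) =====
-- from itertools import permutations
--
-- def is_an_oak(name):
--     """ Returns True if name is starts with 'quercus'
--
--     >>> is_an_oak('quercus robur')
--     True
--
--     >>> is_an_oak('Quercus robur')
--     True
--
--     >>> is_an_oak('Quercuss robur')
--     True
--
--     >>> is_an_oak('Fagus sylvatica')
--     False
--
--     """
--
--     #Generate a list of possible typos by permuting every character and
--     #doubling it
--     _str = 'qquercuss'
--     _str2 = 'quercus'
--     perm_str = permutations(list(_str))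
--     perm_str2 = permutations(list(_str2))
--     list1 = [i for i in perm_str]
--     list2 = [i for i in perm_str2]
--     listone = [''.join(i) for i in list1]
--     listtwo = [''.join(i) for i in list2]
--     #List of possible typos (pretty long)
--     listtot = listone + listtwo
--     for i in listtot:
--         if name.lower().startswith(i):
--             name = 'quercus'
--     _bool = name.lower().startswith('quercus')
--     if name.lower().startswith('quercus'):
--         return True
--     else:
--         return False
-- ===== SOURCE B (Python) =====
-- def is_an_oak(name):
--     """Returns True if name starts with 'quercus' or a single-typo variant of it
--     (any permutation of 'quercus', or of 'qquercuss' = one doubled letter),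
--     checked by comparing sorted prefixes instead of enumerating ~368k permutations."""
--     low = name.lower()
--     return sorted(low[:7]) == sorted('quercus') or sorted(low[:9]) == sorted('qquercuss')
-- ===== Notes on version B (the rewrite author's own statement) =====
-- stated objective: faster
-- what changed: Replaced the enumeration of all 9!+7! (~368k) permutation strings of 'qquercuss'/'quercus' with a direct anagram test: compare the sorted 7- and 9-character prefixes of name.lower() against the sorted target letters.
import Mathlib
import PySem

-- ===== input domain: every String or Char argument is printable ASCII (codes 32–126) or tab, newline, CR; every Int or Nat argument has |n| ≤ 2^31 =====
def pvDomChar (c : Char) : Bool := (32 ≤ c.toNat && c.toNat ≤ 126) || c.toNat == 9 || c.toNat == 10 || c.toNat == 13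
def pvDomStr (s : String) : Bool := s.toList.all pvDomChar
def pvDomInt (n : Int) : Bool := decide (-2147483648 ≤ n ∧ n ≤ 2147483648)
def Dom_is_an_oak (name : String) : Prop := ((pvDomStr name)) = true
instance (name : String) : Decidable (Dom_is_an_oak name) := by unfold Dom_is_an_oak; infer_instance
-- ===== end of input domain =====

-- B replaces A's enumeration of all 9!+7! permutation strings by comparing the sorted
-- 7-/9-character prefixes of name.lower() with the sorted target letters (objective: faster).

-- ===== PORT A =====
-- literal transliteration of A; the permutation lists are enumerated in a different
-- order than itertools', which cannot affect the result (proved order-independent below)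
def is_an_oak (name : String) : Bool :=
  let _str := "qquercuss"
  let _str2 := "quercus"
  let perm_str := PySem.List.permutations _str.toList _str.toList.length
  let perm_str2 := PySem.List.permutations _str2.toList _str2.toList.length
  let list1 := perm_str
  let list2 := perm_str2
  let listone := list1.map (fun i => String.ofList i)   -- ''.join(i)
  let listtwo := list2.map (fun i => String.ofList i)
  let listtot := listone ++ listtwo
  let name := listtot.foldl
    (fun name i => if PySem.Str.startswith (PySem.Str.lower name) i then "quercus" else name)
    name
  let _bool := PySem.Str.startswith (PySem.Str.lower name) "quercus"
  if PySem.Str.startswith (PySem.Str.lower name) "quercus" then true else false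

-- ===== PORT B =====
def is_an_oak_alt (name : String) : Bool :=
  let low := PySem.Str.lower name
  (PySem.List.sorted (PySem.List.slice low.toList none (some 7)) (fun x => x)
      == PySem.List.sorted "quercus".toList (fun x => x))
  || (PySem.List.sorted (PySem.List.slice low.toList none (some 9)) (fun x => x)
      == PySem.List.sorted "qquercuss".toList (fun x => x))

-- ===== PRECONDITION & SPEC =====
def Spec_is_an_oak (name : String) (out : Bool) : Prop := out = is_an_oak_alt name
instance (name : String) (out : Bool) : Decidable (Spec_is_an_oak name out) := by unfold Spec_is_an_oak; infer_instance

-- ===== CLAIM (what is proved, stated in full; the proofs are below) =====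
def Claim_equal_is_an_oak : Prop := ∀ (name : String), Dom_is_an_oak name → Spec_is_an_oak name (is_an_oak name)

-- ===== LEMMAS AND PROOFS =====

-- unfolding of PySem.List.permutations at a successor count
theorem pv_permutations_succ {α : Type} (xs : List α) (r : ℕ) :
    PySem.List.permutations xs (r + 1) =
      (List.range xs.length).flatMap (fun i =>
        match xs[i]? with
        | none => []
        | some a => (PySem.List.permutations (xs.eraseIdx i) r).map (fun p => a :: p)) := rfl

-- converse of PySem.List.perm_of_mem_permutations: every rearrangement is enumerated
theorem pv_mem_permutations_of_perm {α : Type} :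
    ∀ (p xs : List α), p.Perm xs → p ∈ PySem.List.permutations xs xs.length := by
  intro p
  induction p with
  | nil =>
      intro xs h
      have hx : xs = [] := h.symm.eq_nil
      subst hx
      simp [PySem.List.permutations_zero]
  | cons a p ih =>
      intro xs h
      have hlen : xs.length = p.length + 1 := by simpa using h.length_eq.symm
      have ha : a ∈ xs := h.mem_iff.mp (by simp)
      obtain ⟨i, hi, hget⟩ := List.getElem_of_mem ha
      have hperm : p.Perm (xs.eraseIdx i) := by
        have h2 : (xs[i] :: xs.eraseIdx i).Perm xs := List.getElem_cons_eraseIdx_perm hi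
        have h3 := h.trans h2.symm
        rw [hget] at h3
        exact h3.cons_inv
      have hel : (xs.eraseIdx i).length = p.length := by
        rw [List.length_eraseIdx_of_lt hi]; omega
      rw [hlen, pv_permutations_succ]
      refine List.mem_flatMap.mpr ⟨i, List.mem_range.mpr hi, ?_⟩
      have hopt : xs[i]? = some a := by rw [List.getElem?_eq_getElem hi, hget]
      have hm := ih (xs.eraseIdx i) hperm
      rw [hel] at hm
      simp only [hopt]
      exact List.mem_map.mpr ⟨p, hm, rfl⟩

-- once the accumulator is "quercus" it stays "quercus"
theorem pv_foldl_quercus (L : List String) :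
    L.foldl (fun name i => if PySem.Str.startswith (PySem.Str.lower name) i then "quercus" else name)
      "quercus" = "quercus" := by
  induction L with
  | nil => rfl
  | cons i L ih => simpa [ite_self] using ih

-- the loop either leaves name alone or sets it to "quercus", by whether any typo matches
theorem pv_foldl_char (L : List String) (nm : String) :
    L.foldl (fun name i => if PySem.Str.startswith (PySem.Str.lower name) i then "quercus" else name) nm
      = if L.any (fun i => PySem.Str.startswith (PySem.Str.lower nm) i) then "quercus" else nm := by
  induction L with
  | nil => rfl
  | cons i L ih =>
      rw [List.foldl_cons, List.any_cons]
      by_cases hc : PySem.Str.startswith (PySem.Str.lower nm) i = true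
      · rw [if_pos hc, pv_foldl_quercus, hc, Bool.true_or, if_pos rfl]
      · simp only [Bool.not_eq_true] at hc
        rw [if_neg (by rw [hc]; exact Bool.false_ne_true), ih, hc, Bool.false_or]

-- matching some enumerated permutation string ↔ the prefix is a rearrangement of S
theorem pv_any_perm_iff (low S : List Char) :
    ((PySem.List.permutations S S.length).any
        (fun p => PySem.Chars.startswith low p) = true)
      ↔ (low.take S.length).Perm S := by
  constructor
  · intro h
    obtain ⟨p, hp, hsw⟩ := List.any_eq_true.mp h
    have hperm := PySem.List.perm_of_mem_permutations hp
    have hpre : p <+: low := (PySem.Chars.startswith_iff low p).mp hsw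
    have hlp : p.length = S.length := hperm.length_eq
    have htake : low.take S.length = p := by
      rw [← hlp]; exact (List.prefix_iff_eq_take.mp hpre).symm
    rw [htake]; exact hperm
  · intro h
    refine List.any_eq_true.mpr ⟨low.take S.length, pv_mem_permutations_of_perm _ _ h, ?_⟩
    exact (PySem.Chars.startswith_iff _ _).mpr (List.take_prefix _ _)

-- the String-level 'some typo string matches' test, reduced to the two perm conditions
theorem pv_any_iff (name : String) :
    ((((PySem.List.permutations "qquercuss".toList "qquercuss".toList.length).map (fun i => String.ofList i)
        ++ (PySem.List.permutations "quercus".toList "quercus".toList.length).map (fun i => String.ofList i)).any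
          (fun i => PySem.Str.startswith (PySem.Str.lower name) i)) = true)
      ↔ (((PySem.Chars.lower name.toList).take "qquercuss".toList.length).Perm "qquercuss".toList
          ∨ ((PySem.Chars.lower name.toList).take "quercus".toList.length).Perm "quercus".toList) := by
  rw [List.any_append, Bool.or_eq_true]
  have key : ∀ (S : List Char),
      ((((PySem.List.permutations S S.length).map (fun i => String.ofList i)).any
          (fun i => PySem.Str.startswith (PySem.Str.lower name) i)) = true)
        ↔ ((PySem.Chars.lower name.toList).take S.length).Perm S := by
    intro S
    rw [← pv_any_perm_iff, List.any_map]
    have hpt : ∀ p : List Char,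
        ((fun i => PySem.Str.startswith (PySem.Str.lower name) i) ∘ (fun i => String.ofList i)) p
          = PySem.Chars.startswith (PySem.Chars.lower name.toList) p := by
      intro p
      simp [Function.comp, PySem.Str.startswith_eq, PySem.Str.toList_lower]
    constructor
    · intro h
      obtain ⟨p, hp, hs⟩ := List.any_eq_true.mp h
      exact List.any_eq_true.mpr ⟨p, hp, by rw [← hpt p]; exact hs⟩
    · intro h
      obtain ⟨p, hp, hs⟩ := List.any_eq_true.mp h
      exact List.any_eq_true.mpr ⟨p, hp, by rw [hpt p]; exact hs⟩
  rw [key, key]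

-- A computes exactly 'some enumerated typo string is a prefix of name.lower()'
theorem pv_A_eq (name : String) :
    is_an_oak name =
      (((PySem.List.permutations "qquercuss".toList "qquercuss".toList.length).map (fun i => String.ofList i)
        ++ (PySem.List.permutations "quercus".toList "quercus".toList.length).map (fun i => String.ofList i)).any
          (fun i => PySem.Str.startswith (PySem.Str.lower name) i)) := by
  unfold is_an_oak
  simp only []
  rw [pv_foldl_char]
  by_cases h : (((PySem.List.permutations "qquercuss".toList "qquercuss".toList.length).map (fun i => String.ofList i)
        ++ (PySem.List.permutations "quercus".toList "quercus".toList.length).map (fun i => String.ofList i)).any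
          (fun i => PySem.Str.startswith (PySem.Str.lower name) i)) = true
  · rw [h]; simp only [if_true]
    decide
  · simp only [Bool.not_eq_true] at h
    rw [h]; simp only [Bool.false_eq_true, if_false]
    have hq : PySem.Str.startswith (PySem.Str.lower name) "quercus" = false := by
      by_contra hcontra
      simp only [Bool.not_eq_false] at hcontra
      have hmem : "quercus" ∈ ((PySem.List.permutations "qquercuss".toList "qquercuss".toList.length).map (fun i => String.ofList i)
          ++ (PySem.List.permutations "quercus".toList "quercus".toList.length).map (fun i => String.ofList i)) := by
        refine List.mem_append_right _ (List.mem_map.mpr ⟨"quercus".toList, ?_, rfl⟩)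
        exact pv_mem_permutations_of_perm _ _ (List.Perm.refl _)
      have := List.any_eq_true.mpr ⟨"quercus", hmem, hcontra⟩
      rw [this] at h; exact Bool.true_eq_false.mp h
    rw [hq]; rfl

-- B computes the same two perm conditions (sorted prefixes)
theorem pv_B_iff (name : String) :
    is_an_oak_alt name = true
      ↔ (((PySem.Chars.lower name.toList).take "qquercuss".toList.length).Perm "qquercuss".toList
          ∨ ((PySem.Chars.lower name.toList).take "quercus".toList.length).Perm "quercus".toList) := by
  unfold is_an_oak_alt
  simp only [Bool.or_eq_true, beq_iff_eq, PySem.Str.toList_lower]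
  rw [PySem.List.slice_to _ (by norm_num : (0:Int) ≤ 7), PySem.List.slice_to _ (by norm_num : (0:Int) ≤ 9)]
  rw [PySem.List.sorted_id_eq_sorted_id_iff_perm, PySem.List.sorted_id_eq_sorted_id_iff_perm]
  show (_ ∨ _) ↔ (_ ∨ _)
  constructor
  · rintro (h | h)
    · right; exact h
    · left; exact h
  · rintro (h | h)
    · right; exact h
    · left; exact h

-- ===== VERDICT (by name: the statement is the Claim_ definition above) =====
theorem is_an_oak_spec : Claim_equal_is_an_oak := by
  intro name _
  unfold Spec_is_an_oak
  rw [Bool.eq_iff_iff, pv_A_eq, pv_any_iff, pv_B_iff]
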